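-- pv_equiv track=rewrite | github.com/valemr05/Compiladores | RepresentacionIntermedia/irinterp.py | _find_matching_endif
-- ===== SOURCE A (Python) =====
-- class IRRuntimeError(RuntimeError):
-- 	"""Generic IR interpreter error."""
--
-- def _find_matching_endif(code: list[tuple], start: int) -> int:
-- 	depth = 0
-- 	for i in range(start + 1, len(code)):
-- 		op = code[i][0]
-- 		if op == "IF":
-- 			depth += 1
-- 		elif op == "ENDIF":
-- 			if depth == 0:
-- 				return i
-- 			depth -= 1
-- 	raise IRRuntimeError("No se encontró ENDIF correspondiente")
-- ===== SOURCE B (Python) =====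
-- class IRRuntimeError(RuntimeError):
-- 	"""Generic IR interpreter error."""
--
-- def _find_matching_endif(code, start):
-- 	# Recursive bracket matching: a nested IF is resolved by a recursive call,
-- 	# whose result tells us where to resume; no depth counter is kept.
-- 	i = start + 1
-- 	n = len(code)
-- 	while i < n:
-- 		op = code[i][0]
-- 		if op == "ENDIF":
-- 			return i
-- 		if op == "IF":
-- 			i = _find_matching_endif(code, i) + 1
-- 		else:
-- 			i += 1
-- 	raise IRRuntimeError("No se encontró ENDIF correspondiente")
-- ===== Notes on version B (the rewrite author's own statement) =====
-- stated objective: alternative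
-- what changed: Replaces the explicit depth counter with recursive bracket matching: a nested IF is skipped by a recursive call that returns its ENDIF's index, and scanning resumes just after it.
import Mathlib
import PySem

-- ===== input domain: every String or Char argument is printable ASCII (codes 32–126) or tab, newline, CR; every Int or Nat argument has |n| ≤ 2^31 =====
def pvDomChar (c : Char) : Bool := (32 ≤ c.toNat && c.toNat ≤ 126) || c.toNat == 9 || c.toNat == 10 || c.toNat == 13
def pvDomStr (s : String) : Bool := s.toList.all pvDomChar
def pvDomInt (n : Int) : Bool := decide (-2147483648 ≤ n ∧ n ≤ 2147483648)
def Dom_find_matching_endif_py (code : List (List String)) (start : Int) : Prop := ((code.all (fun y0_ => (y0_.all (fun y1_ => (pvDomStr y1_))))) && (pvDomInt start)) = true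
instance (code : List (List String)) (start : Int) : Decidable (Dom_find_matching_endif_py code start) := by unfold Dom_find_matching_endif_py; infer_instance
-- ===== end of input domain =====

-- B replaces A's explicit depth counter with recursive bracket matching (a nested IF is
-- skipped by a recursive call returning its ENDIF's index); alternative decomposition, same cost.


-- shared accessor: Python's `code[i][0]` (none = IndexError)
def pvOpAt (code : List (List String)) (i : Int) : Option String :=
  (PySem.List.pyGet? code i).bind (fun row => PySem.List.pyGet? row 0)

-- ===== PORT A =====
-- A's for-loop over range(start+1, len(code)) with a depth counter; none = the loop
-- exhausts (IRRuntimeError) or code[i][0] raises IndexError.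
def pvALoop (code : List (List String)) (i depth : Int) : Option Int :=
  if _h : i < (code.length : Int) then
    match pvOpAt code i with
    | none => none
    | some op =>
      if op = "IF" then pvALoop code (i + 1) (depth + 1)
      else if op = "ENDIF" then
        if depth = 0 then some i else pvALoop code (i + 1) (depth - 1)
      else pvALoop code (i + 1) depth
  else none
termination_by ((code.length : Int) - i).toNat
decreasing_by all_goals omega

def find_matching_endif_py (code : List (List String)) (start : Int) : Int :=
  (pvALoop code (start + 1) 0).getD 0

-- ===== PORT B =====
-- B's while-loop with a recursive call on a nested IF; fuel only makes the same
-- computation total (it never runs out when the Python returns or raises — see pvBGo_eq).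
def pvBGo (code : List (List String)) : Nat → Int → Option Int
  | 0, _ => none
  | f + 1, i =>
    if i < (code.length : Int) then
      match pvOpAt code i with
      | none => none
      | some op =>
        if op = "ENDIF" then some i
        else if op = "IF" then
          match pvBGo code f (i + 1) with
          | none => none
          | some j => pvBGo code f (j + 1)
        else pvBGo code f (i + 1)
    else none

def find_matching_endif_py_alt (code : List (List String)) (start : Int) : Int :=
  (pvBGo code ((code.length - start).toNat) (start + 1)).getD 0

-- ===== PRECONDITION & SPEC =====
-- Pre_ holds exactly when A returns normally: some scanned position start+1+k holds "ENDIF"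
-- at depth 0 (equally many "IF" and "ENDIF" ops before it) and every row accessed up to
-- there is a valid, non-empty row (the min-cap is no restriction: any index below -len raises
-- IndexError, so a scan longer than 2*len cannot return); it excludes only inputs on which A raises
-- (IRRuntimeError when no matching ENDIF exists, IndexError on an empty row / index < -len).
def Pre_find_matching_endif_py (code : List (List String)) (start : Int) : Prop :=
  ∃ k ∈ List.range (min ((code.length - (start + 1)).toNat) (2 * code.length)),
    (∀ m ∈ List.range (k + 1), (pvOpAt code (start + 1 + m)).isSome) ∧
    pvOpAt code (start + 1 + k) = some "ENDIF" ∧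
    (List.range k).countP (fun m => pvOpAt code (start + 1 + (m : Int)) = some "IF") =
      (List.range k).countP (fun m => pvOpAt code (start + 1 + (m : Int)) = some "ENDIF")

instance (code : List (List String)) (start : Int) : Decidable (Pre_find_matching_endif_py code start) := by
  unfold Pre_find_matching_endif_py; infer_instance

def pvWitness_find_matching_endif_py : List (List String) × Int := ([["IF", "t0"], ["ENDIF"]], 0)

def Spec_find_matching_endif_py (code : List (List String)) (start : Int) (out : Int) : Prop := out = find_matching_endif_py_alt code start
instance (code : List (List String)) (start : Int) (out : Int) : Decidable (Spec_find_matching_endif_py code start out) := by unfold Spec_find_matching_endif_py; infer_instance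

-- ===== CLAIM (what is proved, stated in full; the proofs are below) =====
def Claim_equal_find_matching_endif_py : Prop := ∀ (code : List (List String)) (start : Int), Dom_find_matching_endif_py code start → Pre_find_matching_endif_py code start → Spec_find_matching_endif_py code start (find_matching_endif_py code start)

-- ===== LEMMAS AND PROOFS =====

-- A's loop only returns an index inside the scanned range.
theorem pvALoop_bounds (code : List (List String)) :
    ∀ (N : Nat) (i depth j : Int), ((code.length : Int) - i).toNat ≤ N →
      pvALoop code i depth = some j → i ≤ j ∧ j < (code.length : Int) := by
  intro N
  induction N with
  | zero =>
    intro i depth j h hs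
    rw [pvALoop] at hs
    have : ¬ i < (code.length : Int) := by omega
    simp [this] at hs
  | succ N ih =>
    intro i depth j h hs
    rw [pvALoop] at hs
    by_cases hi : i < (code.length : Int)
    · simp only [hi, dif_pos] at hs
      cases hop : pvOpAt code i with
      | none => simp [hop] at hs
      | some op =>
        simp only [hop] at hs
        split_ifs at hs with h1 h2 h3
        · have := ih (i + 1) (depth + 1) j (by omega) hs; omega
        · simp at hs; omega
        · have := ih (i + 1) (depth - 1) j (by omega) hs; omega
        · have := ih (i + 1) depth j (by omega) hs; omega
    · simp [hi] at hs

-- Unrolling one depth level of A's counter equals one nested scan followed by a resumed scan.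
theorem pvALoop_succ (code : List (List String)) :
    ∀ (N : Nat) (i d : Int), ((code.length : Int) - i).toNat ≤ N → 0 ≤ d →
      pvALoop code i (d + 1) =
        (pvALoop code i 0).bind (fun j => pvALoop code (j + 1) d) := by
  intro N
  induction N with
  | zero =>
    intro i d h _
    have hi : ¬ i < (code.length : Int) := by omega
    rw [pvALoop]
    conv_rhs => rw [pvALoop]
    simp [hi]
  | succ N ih =>
    intro i d h hd
    by_cases hi : i < (code.length : Int)
    · rw [pvALoop]
      conv_rhs => rw [pvALoop]
      simp only [hi, dif_pos]
      cases hop : pvOpAt code i with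
      | none => simp
      | some op =>
        by_cases h1 : op = "IF"
        · simp only [h1, if_pos]
          rw [ih (i + 1) (d + 1) (by omega) (by omega),
              ih (i + 1) 0 (by omega) le_rfl]
          cases hj : pvALoop code (i + 1) 0 with
          | none => simp
          | some j =>
            have hb := pvALoop_bounds code (((code.length : Int) - (i + 1)).toNat)
              (i + 1) 0 j le_rfl hj
            simp only [Option.bind_some]
            rw [ih (j + 1) d (by omega) hd]
        · by_cases h2 : op = "ENDIF"
          · have hne : ¬ d + 1 = 0 := by omega
            simp only [h2, hne, if_pos, if_false]
            simp
          · simp only [h1, if_neg, h2, if_neg, not_false_iff]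
            rw [ih (i + 1) d (by omega) hd]
    · rw [pvALoop]
      conv_rhs => rw [pvALoop]
      simp [hi]

-- With enough fuel, B's recursive scan computes exactly A's depth-0 loop.
theorem pvBGo_eq (code : List (List String)) :
    ∀ (f : Nat) (i : Int), (code.length : Int) - i < (f : Int) →
      pvBGo code f i = pvALoop code i 0 := by
  intro f
  induction f with
  | zero =>
    intro i h
    have hi : ¬ i < (code.length : Int) := by
      simp only [Nat.cast_zero] at h; omega
    rw [pvALoop]; simp [pvBGo, hi]
  | succ f ih =>
    intro i h
    rw [pvBGo, pvALoop]
    by_cases hi : i < (code.length : Int)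
    · simp only [hi, if_pos, dif_pos]
      cases hop : pvOpAt code i with
      | none => simp
      | some op =>
        by_cases h2 : op = "ENDIF"
        · have h1 : op ≠ "IF" := by simp [h2]
          simp [h2]
        · by_cases h1 : op = "IF"
          · simp only [h1]
            simp only [if_neg (by simp : ¬ ("IF" : String) = "ENDIF")]
            rw [ih (i + 1) (by push_cast at h ⊢; omega)]
            rw [pvALoop_succ code (((code.length : Int) - (i + 1)).toNat)
                  (i + 1) 0 le_rfl le_rfl]
            cases hj : pvALoop code (i + 1) 0 with
            | none => simp
            | some j =>
              have hb := pvALoop_bounds code (((code.length : Int) - (i + 1)).toNat)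
                (i + 1) 0 j le_rfl hj
              simp only [Option.bind_some]
              exact ih (j + 1) (by push_cast at h ⊢; omega)
          · simp only [h1, h2, if_neg, not_false_iff]
            exact ih (i + 1) (by push_cast at h ⊢; omega)
    · simp [hi]

-- ===== VERDICT (by name: the statement is the Claim_ definition above) =====
theorem find_matching_endif_py_spec : Claim_equal_find_matching_endif_py := by
  intro code start _hdom _hpre
  unfold Spec_find_matching_endif_py find_matching_endif_py find_matching_endif_py_alt
  rw [pvBGo_eq code ((code.length - start).toNat) (start + 1) (by omega)]
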